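-- pv_equiv track=rewrite | github.com/zhudefu-tyut/ACE | isight/cohesive_element_creat.py | process_dict_and_list
-- ===== SOURCE A (Python) =====
-- def process_dict_and_list(data_dict, target_list):
--     list2 = []
--     list3 = []
--
--     for key1, value1 in data_dict.items():
--         if key1 in list2:
--             continue
--
--         for key2, value2 in data_dict.items():
--             if key1 != key2:
--                 intersection = set(value1) & set(value2)
--
--                 if intersection and not intersection.issubset(set(target_list)):
--                     if key1 not in list2:
--                         list2.append(key1)
--                     if key2 not in list2:
--                         list2.append(key2)
--                     tuple_to_add = (key1, key2) if (key1, key2) not in list3 else None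
--                     if tuple_to_add is not None:
--                         list3.append(tuple_to_add)
--                     break
--
--         if key1 not in list2:
--             repeated_numbers = set(value1) & set(target_list)
--             if repeated_numbers.issubset(set(target_list)):
--                 list2.append(key1)
--                 tuple_to_add = (key1,)
--                 if not any(key1 in t for t in list3):
--                     list3.append(tuple_to_add)
--
--     return list2, list3
-- ===== SOURCE B (Python) =====
-- def process_dict_and_list(data_dict, target_list):
--     target = set(target_list)
--     keys = list(data_dict)
--     sig = [set(data_dict[k]) - target for k in keys]
--     # invert: element -> increasing list of key positions whose value contains it (outside target)
--     occ = {}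
--     for i, s in enumerate(sig):
--         for e in s:
--             occ.setdefault(e, []).append(i)
--     used = set()
--     order = []
--     groups = []
--     for i, k in enumerate(keys):
--         if k in used:
--             continue
--         # earliest other key sharing a non-target element: min over first/second occurrence
--         best = None
--         for e in sig[i]:
--             l = occ[e]
--             j = l[0] if l[0] != i else (l[1] if len(l) > 1 else None)
--             if j is not None and (best is None or j < best):
--                 best = j
--         if best is None:
--             used.add(k)
--             order.append(k)
--             groups.append((k,))
--         else:
--             k2 = keys[best]
--             used.add(k)
--             order.append(k)
--             if k2 not in used:
--                 used.add(k2)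
--                 order.append(k2)
--             groups.append((k, k2))
--     return order, groups
-- ===== Notes on version B (the rewrite author's own statement) =====
-- stated objective: faster
-- what changed: B precomputes each key's set of non-target elements once and builds an element-to-key-positions index, then finds each key's earliest partner by constant-time lookups per element, instead of A's nested all-pairs scan that rebuilds and intersects value sets for every key pair.
import Mathlib
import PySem

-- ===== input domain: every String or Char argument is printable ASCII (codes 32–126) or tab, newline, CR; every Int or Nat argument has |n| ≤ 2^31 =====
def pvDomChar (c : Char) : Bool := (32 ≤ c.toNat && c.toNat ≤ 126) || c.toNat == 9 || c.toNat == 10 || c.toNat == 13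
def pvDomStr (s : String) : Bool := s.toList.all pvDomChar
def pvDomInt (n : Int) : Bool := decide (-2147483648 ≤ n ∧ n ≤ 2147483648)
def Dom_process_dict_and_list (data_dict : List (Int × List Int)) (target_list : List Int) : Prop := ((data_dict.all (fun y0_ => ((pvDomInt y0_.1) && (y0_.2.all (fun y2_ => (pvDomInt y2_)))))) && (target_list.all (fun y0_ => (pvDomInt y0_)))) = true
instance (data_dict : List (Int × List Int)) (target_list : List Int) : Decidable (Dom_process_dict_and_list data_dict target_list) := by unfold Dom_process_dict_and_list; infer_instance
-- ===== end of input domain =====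

-- B replaces A's all-pairs set-intersection scan by a per-key non-target element set plus
-- an element→key-positions index (objective: faster).

-- ===== PORT A =====
-- 'intersection and not intersection.issubset(set(target_list))' for a candidate pair
def pvPairCond (v1 v2 target : List Int) : Bool :=
  let inter : PySem.Set Int := PySem.Set.inter (PySem.Set.ofList v1) (PySem.Set.ofList v2)
  !(inter.isEmpty) && !(PySem.Set.issubset inter (PySem.Set.ofList target))

-- A's inner 'for key2, value2 … break' loop: the first partner key, if any
def pvFindPartner (key1 : Int) (v1 target : List Int) : List (Int × List Int) → Option Int
  | [] => none
  | (key2, v2) :: rest =>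
    if key1 != key2 && pvPairCond v1 v2 target then some key2
    else pvFindPartner key1 v1 target rest

-- A's outer loop over data_dict.items(), state (list2, list3)
def pvLoopA (dd : List (Int × List Int)) (target : List Int) :
    List (Int × List Int) → List Int × List (List Int) → List Int × List (List Int)
  | [], st => st
  | (k1, v1) :: rest, (l2, l3) =>
    if k1 ∈ l2 then pvLoopA dd target rest (l2, l3)
    else
      let st1 : List Int × List (List Int) :=
        match pvFindPartner k1 v1 target dd with
        | some k2 =>
          let l2a := if k1 ∈ l2 then l2 else l2 ++ [k1]
          let l2b := if k2 ∈ l2a then l2a else l2a ++ [k2]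
          (l2b, if [k1, k2] ∈ l3 then l3 else l3 ++ [[k1, k2]])
        | none => (l2, l3)
      let st2 : List Int × List (List Int) :=
        if k1 ∈ st1.1 then st1
        else
          let rep : PySem.Set Int := PySem.Set.inter (PySem.Set.ofList v1) (PySem.Set.ofList target)
          if PySem.Set.issubset rep (PySem.Set.ofList target) then
            (st1.1 ++ [k1], if st1.2.any (fun t => decide (k1 ∈ t)) then st1.2 else st1.2 ++ [[k1]])
          else st1
      pvLoopA dd target rest st2

def process_dict_and_list (data_dict : List (Int × List Int)) (target_list : List Int) : List Int × List (List Int) :=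
  pvLoopA data_dict target_list data_dict ([], [])

-- ===== PORT B =====
-- occ: element → increasing list of the key positions whose non-target set contains it
def pvOcc (sig : List (List Int)) : PySem.Dict Int (List Nat) :=
  sig.zipIdx.foldl
    (fun occ p => p.1.foldl (fun occ e => occ.modify e [] (· ++ [p.2])) occ)
    PySem.Dict.empty

-- 'l[0] if l[0] != i else (l[1] if len(l) > 1 else None)'
def pvFirstOther (l : List Nat) (i : Nat) : Option Nat :=
  match l with
  | [] => none
  | a :: rest => if a ≠ i then some a else rest.head?

-- earliest other position sharing a non-target element with position i
def pvBest (occ : PySem.Dict Int (List Nat)) (s : List Int) (i : Nat) : Option Nat :=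
  s.foldl (fun best e =>
    match pvFirstOther (occ.getD e []) i, best with
    | some j, none => some j
    | some j, some b => if j < b then some j else some b
    | none, b => b) none

-- B's main loop over enumerate(keys), state (used, order, groups)
def pvLoopB (keys : List Int) (sig : List (List Int)) (occ : PySem.Dict Int (List Nat)) :
    List (Int × Nat) → PySem.Set Int × List Int × List (List Int) → List Int × List (List Int)
  | [], (_, order, groups) => (order, groups)
  | (k, i) :: rest, (used, order, groups) =>
    if k ∈ used then pvLoopB keys sig occ rest (used, order, groups)
    else
      match pvBest occ (sig.getD i []) i with
      | none => pvLoopB keys sig occ rest (PySem.Set.add used k, order ++ [k], groups ++ [[k]])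
      | some j =>
        let k2 := keys.getD j 0
        let used1 := PySem.Set.add used k
        let order1 := order ++ [k]
        if k2 ∈ used1 then pvLoopB keys sig occ rest (used1, order1, groups ++ [[k, k2]])
        else pvLoopB keys sig occ rest (PySem.Set.add used1 k2, order1 ++ [k2], groups ++ [[k, k2]])

def process_dict_and_list_alt (data_dict : List (Int × List Int)) (target_list : List Int) : List Int × List (List Int) :=
  let target : PySem.Set Int := PySem.Set.ofList target_list
  let keys : List Int := data_dict.map Prod.fst
  let sig : List (List Int) := data_dict.map (fun p => PySem.Set.diff (PySem.Set.ofList p.2) target)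
  let occ := pvOcc sig
  pvLoopB keys sig occ keys.zipIdx ([], [], [])

-- ===== PRECONDITION & SPEC =====
-- Pre_ excludes association lists with duplicate keys: the Python argument is a dict, which
-- collapses duplicate keys, so such lists do not faithfully represent any dict input.
def Pre_process_dict_and_list (data_dict : List (Int × List Int)) (target_list : List Int) : Prop :=
  (data_dict.map Prod.fst).Nodup
instance (data_dict : List (Int × List Int)) (target_list : List Int) : Decidable (Pre_process_dict_and_list data_dict target_list) := by unfold Pre_process_dict_and_list; infer_instance

def pvWitness_process_dict_and_list : (List (Int × List Int)) × List Int :=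
  ([(1, [2]), (2, [2]), (3, [5])], [5])

def Spec_process_dict_and_list (data_dict : List (Int × List Int)) (target_list : List Int) (out : List Int × List (List Int)) : Prop := out = process_dict_and_list_alt data_dict target_list
instance (data_dict : List (Int × List Int)) (target_list : List Int) (out : List Int × List (List Int)) : Decidable (Spec_process_dict_and_list data_dict target_list out) := by unfold Spec_process_dict_and_list; infer_instance

-- ===== CLAIM (what is proved, stated in full; the proofs are below) =====
def Claim_equal_process_dict_and_list : Prop := ∀ (data_dict : List (Int × List Int)) (target_list : List Int), Dom_process_dict_and_list data_dict target_list → Pre_process_dict_and_list data_dict target_list → Spec_process_dict_and_list data_dict target_list (process_dict_and_list data_dict target_list)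

-- ===== LEMMAS AND PROOFS =====

-- option-minimum: what pvBest's fold step computes
def pvOptMin (a b : Option Nat) : Option Nat :=
  match a, b with
  | none, b => b
  | a, none => a
  | some x, some y => some (min x y)

theorem pvBest_step_eq (best j' : Option Nat) :
    (match j', best with
      | some j, none => some j
      | some j, some b => if j < b then some j else some b
      | none, b => b) = pvOptMin best j' := by
  cases j' with
  | none => cases best <;> rfl
  | some j =>
    cases best with
    | none => rfl
    | some b =>
      simp only [pvOptMin]
      split <;> rw [Option.some.injEq] <;> omega

theorem pvOptMin_assoc (a b c : Option Nat) :
    pvOptMin (pvOptMin a b) c = pvOptMin a (pvOptMin b c) := by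
  cases a <;> cases b <;> cases c <;> simp [pvOptMin, Nat.min_assoc]

theorem pvOptMin_none (a : Option Nat) : pvOptMin none a = a := by
  cases a <;> rfl

theorem pvFind?_congr {α : Type} (l : List α) (p q : α → Bool)
    (h : ∀ x ∈ l, p x = q x) : l.find? p = l.find? q := by
  induction l with
  | nil => rfl
  | cons a l ih =>
    simp only [List.find?_cons]
    rw [h a (by simp)]
    cases q a
    · exact ih (fun x hx => h x (by simp [hx]))
    · rfl

theorem pvHead?_filter {α : Type} (q : α → Bool) (l : List α) :
    (l.filter q).head? = l.find? q := by
  induction l with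
  | nil => rfl
  | cons a l ih =>
    by_cases h : q a = true
    · simp [List.filter_cons_of_pos h, List.find?_cons_of_pos h]
    · simp only [Bool.not_eq_true] at h
      rw [List.filter_cons_of_neg (by simp [h]), List.find?_cons_of_neg (by simp [h]), ih]

theorem pvFind_optMin (p q : Nat → Bool) (L : List Nat) (h : L.Pairwise (· < ·)) :
    pvOptMin (L.find? p) (L.find? q) = L.find? (fun j => p j || q j) := by
  induction L with
  | nil => rfl
  | cons c L ih =>
    have hlt : ∀ j ∈ L, c < j := (List.pairwise_cons.mp h).1
    have hL : L.Pairwise (· < ·) := (List.pairwise_cons.mp h).2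
    by_cases hp : p c = true
    · rw [List.find?_cons_of_pos hp, List.find?_cons_of_pos (p := fun j => p j || q j) (by simp [hp])]
      by_cases hq : q c = true
      · rw [List.find?_cons_of_pos hq]; simp [pvOptMin]
      · rw [List.find?_cons_of_neg (by simp [hq])]
        cases hfq : L.find? q with
        | none => rfl
        | some d =>
          have hd := hlt d (List.mem_of_find?_eq_some hfq)
          simp only [pvOptMin, Option.some.injEq]
          omega
    · by_cases hq : q c = true
      · rw [List.find?_cons_of_neg (by simp [hp]), List.find?_cons_of_pos hq,
            List.find?_cons_of_pos (p := fun j => p j || q j) (by simp [hp, hq])]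
        cases hfp : L.find? p with
        | none => rfl
        | some d =>
          have hd := hlt d (List.mem_of_find?_eq_some hfp)
          simp only [pvOptMin, Option.some.injEq]
          omega
      · rw [List.find?_cons_of_neg (by simp [hp]), List.find?_cons_of_neg (by simp [hq]),
            List.find?_cons_of_neg (p := fun j => p j || q j) (by simp [hp, hq])]
        exact ih hL

theorem pvFoldl_best {α : Type} (s : List α) (L : List Nat) (h : L.Pairwise (· < ·))
    (F : α → Option Nat) (P : α → Nat → Bool)
    (hF : ∀ e ∈ s, F e = L.find? (P e)) (acc : Option Nat) :
    s.foldl (fun best e => pvOptMin best (F e)) acc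
      = pvOptMin acc (L.find? (fun j => s.any (fun e => P e j))) := by
  induction s generalizing acc with
  | nil =>
    rw [List.foldl_nil, List.find?_eq_none.mpr (by simp)]
    cases acc <;> rfl
  | cons e s ih =>
    rw [List.foldl_cons, hF e (by simp),
        ih (fun e' he' => hF e' (by simp [he'])), pvOptMin_assoc,
        pvFind_optMin _ _ L h]
    rfl

theorem pvFilter_firstOther (q : Nat → Bool) (L : List Nat) (h : L.Pairwise (· < ·)) (i : Nat) :
    pvFirstOther (L.filter q) i = L.find? (fun j => decide (j ≠ i) && q j) := by
  induction L with
  | nil => rfl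
  | cons c L ih =>
    have hlt : ∀ j ∈ L, c < j := (List.pairwise_cons.mp h).1
    have hL : L.Pairwise (· < ·) := (List.pairwise_cons.mp h).2
    by_cases hq : q c = true
    · rw [List.filter_cons_of_pos hq]
      by_cases hc : c = i
      · subst hc
        rw [List.find?_cons_of_neg (by simp [hq]), pvFirstOther]
        simp only [ne_eq, not_true_eq_false, if_false, pvHead?_filter]
        apply pvFind?_congr
        intro j hj
        simp [(hlt j hj).ne']
      · rw [List.find?_cons_of_pos (by simp [hc, hq]), pvFirstOther, if_pos hc]
    · rw [List.filter_cons_of_neg (by simp [hq]),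
          List.find?_cons_of_neg (by simp [hq]), ih hL]

-- unique-element filter on a Nodup list
theorem pvFilter_beq_of_nodup (s : List Int) (hs : s.Nodup) (e : Int) :
    s.filter (fun x => x == e) = if e ∈ s then [e] else [] := by
  induction s with
  | nil => simp
  | cons a s ih =>
    rcases List.nodup_cons.mp hs with ⟨ha, hs'⟩
    by_cases hae : a = e
    · subst hae
      rw [List.filter_cons_of_pos (by simp), if_pos (by simp), ih hs', if_neg ha]
    · rw [List.filter_cons_of_neg (by simp [hae]), ih hs']
      by_cases he : e ∈ s
      · rw [if_pos he, if_pos (by simp [he])]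
      · rw [if_neg he, if_neg (by simp [Ne.symm hae, he])]

-- one index-pass of the occ-building loop
theorem pvInner_getD (s : List Int) (hs : s.Nodup) (nidx : Nat)
    (d : PySem.Dict Int (List Nat)) (e : Int) :
    (s.foldl (fun occ e' => occ.modify e' [] (· ++ [nidx])) d).getD e []
      = d.getD e [] ++ (if e ∈ s then [nidx] else []) := by
  rw [show (s.foldl (fun occ e' => occ.modify e' [] (· ++ [nidx])) d)
        = ((s.map (fun e' => (e', nidx))).foldl (fun occ p => occ.modify p.1 [] (· ++ [p.2])) d)
      from (List.foldl_map (f := fun e' => ((e' : Int), nidx))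
        (g := fun occ p => occ.modify p.1 [] (· ++ [p.2])) (l := s) (init := d)).symm]
  rw [PySem.Dict.getD_foldl_modify_append]
  congr 1
  rw [List.filter_map, List.map_map]
  rw [show ((fun (p : Int × Nat) => p.1 == e) ∘ (fun e' => ((e' : Int), nidx)))
        = fun x => x == e from rfl]
  rw [pvFilter_beq_of_nodup s hs e]
  by_cases he : e ∈ s <;> simp [he]

-- occ characterisation: the positions whose sig-set contains e, in increasing order
theorem pvOcc_getD (sig : List (List Int)) (hnd : ∀ s ∈ sig, s.Nodup) (e : Int) :
    (pvOcc sig).getD e []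
      = (List.range sig.length).filter (fun i => decide (e ∈ sig.getD i [])) := by
  induction sig using List.reverseRecOn with
  | nil => simp [pvOcc]
  | append_singleton sig s ih =>
    have hs : s.Nodup := hnd s (by simp)
    have hsig : ∀ t ∈ sig, t.Nodup := fun t ht => hnd t (by simp [ht])
    unfold pvOcc
    rw [List.zipIdx_append, List.foldl_append]
    simp only [List.zipIdx_cons, List.zipIdx_nil, List.foldl_cons, List.foldl_nil, Nat.zero_add]
    rw [pvInner_getD s hs sig.length _ e]
    rw [show (sig.zipIdx.foldl
          (fun occ p => p.1.foldl (fun occ e => occ.modify e [] (· ++ [p.2])) occ)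
          PySem.Dict.empty) = pvOcc sig from rfl, ih hsig]
    rw [List.length_append, List.length_cons, List.length_nil, List.range_succ,
        List.filter_append]
    congr 1
    · apply List.filter_congr
      intro i hi
      have hi' : i < sig.length := List.mem_range.mp hi
      have : (sig ++ [s]).getD i [] = sig.getD i [] := by
        rw [List.getD_eq_getElem?_getD, List.getD_eq_getElem?_getD,
            List.getElem?_append_left hi']
      rw [this]
    · have hgd : (sig ++ [s]).getD sig.length [] = s := by
        rw [List.getD_eq_getElem?_getD, List.getElem?_append_right (le_refl _)]
        simp
      simp only [List.filter_cons, List.filter_nil, hgd]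
      by_cases he : e ∈ s <;> simp [he]

theorem pvPairCond_iff (v1 v2 target : List Int) :
    pvPairCond v1 v2 target = true ↔ ∃ x, x ∈ v1 ∧ x ∈ v2 ∧ x ∉ target := by
  unfold pvPairCond
  simp only [Bool.and_eq_true, Bool.not_eq_true', List.isEmpty_eq_false_iff_exists_mem]
  rw [← Bool.not_eq_true, PySem.Set.issubset_iff]
  push_neg
  constructor
  · rintro ⟨-, x, hx, hxt⟩
    rw [PySem.Set.mem_inter, PySem.Set.mem_ofList, PySem.Set.mem_ofList] at hx
    rw [PySem.Set.mem_ofList] at hxt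
    exact ⟨x, hx.1, hx.2, hxt⟩
  · rintro ⟨x, hx1, hx2, hxt⟩
    have hx : x ∈ PySem.Set.inter (PySem.Set.ofList v1) (PySem.Set.ofList v2) := by
      rw [PySem.Set.mem_inter, PySem.Set.mem_ofList, PySem.Set.mem_ofList]
      exact ⟨hx1, hx2⟩
    exact ⟨⟨x, hx⟩, x, hx, by rwa [PySem.Set.mem_ofList]⟩

theorem pvRep_subset (v target : List Int) :
    PySem.Set.issubset (PySem.Set.inter (PySem.Set.ofList v) (PySem.Set.ofList target))
      (PySem.Set.ofList target) = true := by
  rw [PySem.Set.issubset_iff]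
  intro x hx
  rw [PySem.Set.mem_inter] at hx
  exact hx.2

theorem pvFindPartner_eq_find? (key1 : Int) (v1 target : List Int) (l : List (Int × List Int)) :
    pvFindPartner key1 v1 target l
      = (l.find? (fun p => key1 != p.1 && pvPairCond v1 p.2 target)).map Prod.fst := by
  induction l with
  | nil => rfl
  | cons a l ih =>
    obtain ⟨k2, v2⟩ := a
    rw [pvFindPartner]
    by_cases h : (key1 != k2 && pvPairCond v1 v2 target) = true
    · rw [if_pos h, List.find?_cons_of_pos (by exact h)]
      rfl
    · rw [if_neg h, ih, List.find?_cons_of_neg (by exact h)]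

theorem pvFind?_index {α : Type} (l : List α) (p : α → Bool) (d : α) :
    l.find? p
      = ((List.range l.length).find? (fun j => p (l.getD j d))).map (fun j => l.getD j d) := by
  induction l with
  | nil => rfl
  | cons a l ih =>
    rw [List.length_cons, List.range_succ_eq_map]
    by_cases hp : p a = true
    · rw [List.find?_cons_of_pos hp, List.find?_cons_of_pos (by simpa using hp)]
      simp
    · rw [List.find?_cons_of_neg (by simp [hp]), List.find?_cons_of_neg (by simpa using hp),
          List.find?_map,
          pvFind?_congr (List.range l.length) _ (fun j => p (l.getD j d))
            (fun x _ => by simp [Function.comp, List.getD_cons_succ]),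
          ih]
      cases (List.range l.length).find? (fun j => p (l.getD j d)) with
      | none => rfl
      | some j => simp [List.getD_cons_succ]

-- sig as a function of the inputs (the very term PORT B builds)
def pvSigL (dd : List (Int × List Int)) (target : List Int) : List (List Int) :=
  dd.map (fun p => PySem.Set.diff (PySem.Set.ofList p.2) (PySem.Set.ofList target))

-- the common first-partner predicate, on indices
def pvQ (dd : List (Int × List Int)) (target : List Int) (i j : Nat) : Bool :=
  ((pvSigL dd target).getD i []).any
    (fun e => decide (j ≠ i) && decide (e ∈ (pvSigL dd target).getD j []))

theorem pvSigL_length (dd : List (Int × List Int)) (target : List Int) :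
    (pvSigL dd target).length = dd.length := by
  simp [pvSigL]

theorem pvSigL_nodup (dd : List (Int × List Int)) (target : List Int) :
    ∀ s ∈ pvSigL dd target, s.Nodup := by
  intro s hs
  rcases List.mem_map.mp hs with ⟨p, -, rfl⟩
  exact PySem.Set.nodup_diff _ _ (PySem.Set.nodup_ofList _)

theorem pvSigL_getD (dd : List (Int × List Int)) (target : List Int) (j : Nat)
    (hj : j < dd.length) :
    (pvSigL dd target).getD j []
      = PySem.Set.diff (PySem.Set.ofList (dd.getD j ((0 : Int), ([] : List Int))).2)
          (PySem.Set.ofList target) := by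
  unfold pvSigL
  rw [List.getD_eq_getElem _ _ (by simpa using hj), List.getD_eq_getElem _ _ hj,
      List.getElem_map]

theorem pvKeys_getD (dd : List (Int × List Int)) (j : Nat) (hj : j < dd.length) :
    (dd.map Prod.fst).getD j 0 = (dd.getD j ((0 : Int), ([] : List Int))).1 := by
  rw [List.getD_eq_getElem _ _ (by simpa using hj), List.getD_eq_getElem _ _ hj,
      List.getElem_map]

theorem pvKeys_inj (dd : List (Int × List Int)) (hnd : (dd.map Prod.fst).Nodup)
    {i j : Nat} (hi : i < dd.length) (hj : j < dd.length)
    (h : (dd.map Prod.fst).getD i 0 = (dd.map Prod.fst).getD j 0) : i = j := by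
  rw [List.getD_eq_getElem _ _ (by simpa using hi),
      List.getD_eq_getElem _ _ (by simpa using hj)] at h
  exact hnd.getElem_inj_iff.mp h

theorem pvMem_sig (dd : List (Int × List Int)) (target : List Int) (j : Nat)
    (hj : j < dd.length) (e : Int) :
    e ∈ (pvSigL dd target).getD j []
      ↔ e ∈ (dd.getD j ((0 : Int), ([] : List Int))).2 ∧ e ∉ target := by
  rw [pvSigL_getD dd target j hj, PySem.Set.mem_diff, PySem.Set.mem_ofList,
      PySem.Set.mem_ofList]

theorem pvQ_ne (dd : List (Int × List Int)) (target : List Int) (i j : Nat)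
    (h : pvQ dd target i j = true) : j ≠ i := by
  unfold pvQ at h
  rw [List.any_eq_true] at h
  rcases h with ⟨e, -, he⟩
  rw [Bool.and_eq_true, decide_eq_true_eq, decide_eq_true_eq] at he
  exact he.1

theorem pvBest_eq (dd : List (Int × List Int)) (target : List Int) (i : Nat) :
    pvBest (pvOcc (pvSigL dd target)) ((pvSigL dd target).getD i []) i
      = (List.range dd.length).find? (pvQ dd target i) := by
  unfold pvBest
  rw [PySem.List.foldl_congr_mem _ _
        (fun best e =>
          pvOptMin best (pvFirstOther ((pvOcc (pvSigL dd target)).getD e []) i)) _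
        (by intro acc x _; exact pvBest_step_eq acc _)]
  rw [pvFoldl_best _ (List.range dd.length) List.pairwise_lt_range
        (fun e => pvFirstOther ((pvOcc (pvSigL dd target)).getD e []) i)
        (fun e j => decide (j ≠ i) && decide (e ∈ (pvSigL dd target).getD j []))
        (fun e _ => by
          show pvFirstOther ((pvOcc (pvSigL dd target)).getD e []) i
            = (List.range dd.length).find?
                (fun j => decide (j ≠ i) && decide (e ∈ (pvSigL dd target).getD j []))
          rw [pvOcc_getD _ (pvSigL_nodup dd target) e, pvSigL_length,
              pvFilter_firstOther _ _ List.pairwise_lt_range i])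
        none, pvOptMin_none]
  rfl

theorem pvPartner_eq (dd : List (Int × List Int)) (target : List Int)
    (hnd : (dd.map Prod.fst).Nodup) (i : Nat) (hi : i < dd.length) :
    pvFindPartner ((dd.map Prod.fst).getD i 0) ((dd.getD i ((0 : Int), ([] : List Int))).2)
        target dd
      = ((List.range dd.length).find? (pvQ dd target i)).map
          (fun j => (dd.map Prod.fst).getD j 0) := by
  rw [pvFindPartner_eq_find?, pvFind?_index dd _ ((0 : Int), ([] : List Int)),
      Option.map_map]
  rw [pvFind?_congr (List.range dd.length) _ (pvQ dd target i) ?_]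
  · cases hf : (List.range dd.length).find? (pvQ dd target i) with
    | none => rfl
    | some j =>
      have hj : j < dd.length := List.mem_range.mp (List.mem_of_find?_eq_some hf)
      simp only [Option.map_some, Function.comp, Option.some.injEq]
      exact (pvKeys_getD dd j hj).symm
  · intro j hj
    have hjn : j < dd.length := List.mem_range.mp hj
    rw [Bool.eq_iff_iff]
    simp only [Bool.and_eq_true, bne_iff_ne]
    unfold pvQ
    rw [List.any_eq_true]
    constructor
    · rintro ⟨hne, hcond⟩
      rcases (pvPairCond_iff _ _ _).mp hcond with ⟨x, hx1, hx2, hxt⟩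
      have hji : j ≠ i := by
        intro hji
        subst hji
        exact hne (pvKeys_getD dd j hjn)
      exact ⟨x, (pvMem_sig dd target i hi x).mpr ⟨hx1, hxt⟩, by
        simp only [Bool.and_eq_true, decide_eq_true_eq]
        exact ⟨hji, (pvMem_sig dd target j hjn x).mpr ⟨hx2, hxt⟩⟩⟩
    · rintro ⟨x, hxi, hx⟩
      simp only [Bool.and_eq_true, decide_eq_true_eq] at hx
      obtain ⟨hji, hxj⟩ := hx
      rcases (pvMem_sig dd target i hi x).mp hxi with ⟨hx1, hxt⟩
      rcases (pvMem_sig dd target j hjn x).mp hxj with ⟨hx2, -⟩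
      refine ⟨?_, (pvPairCond_iff _ _ _).mpr ⟨x, hx1, hx2, hxt⟩⟩
      rw [← pvKeys_getD dd j hjn]
      intro heq
      exact hji (pvKeys_inj dd hnd hjn hi heq.symm)

theorem pvZipIdx_map_fst {α : Type} (l : List α) (k : Nat) :
    (l.zipIdx k).map Prod.fst = l := by
  induction l generalizing k with
  | nil => rfl
  | cons a l ih => simp only [List.zipIdx_cons, List.map_cons, ih]

-- one-step unfoldings of the two main loops
theorem pvLoopA_cons_mem (dd : List (Int × List Int)) (target : List Int)
    (k1 : Int) (v1 : List Int) (rest : List (Int × List Int))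
    (l2 : List Int) (l3 : List (List Int)) (h : k1 ∈ l2) :
    pvLoopA dd target ((k1, v1) :: rest) (l2, l3) = pvLoopA dd target rest (l2, l3) := by
  simp [pvLoopA, h]

theorem pvLoopA_cons_none (dd : List (Int × List Int)) (target : List Int)
    (k1 : Int) (v1 : List Int) (rest : List (Int × List Int))
    (l2 : List Int) (l3 : List (List Int)) (h : k1 ∉ l2)
    (hp : pvFindPartner k1 v1 target dd = none)
    (hany : l3.any (fun t => decide (k1 ∈ t)) = false) :
    pvLoopA dd target ((k1, v1) :: rest) (l2, l3)
      = pvLoopA dd target rest (l2 ++ [k1], l3 ++ [[k1]]) := by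
  simp [pvLoopA, hp, h, hany, pvRep_subset]

theorem pvLoopA_cons_some (dd : List (Int × List Int)) (target : List Int)
    (k1 k2 : Int) (v1 : List Int) (rest : List (Int × List Int))
    (l2 : List Int) (l3 : List (List Int)) (h : k1 ∉ l2)
    (hp : pvFindPartner k1 v1 target dd = some k2) (hk2 : k2 ≠ k1)
    (hmem : [k1, k2] ∉ l3) :
    pvLoopA dd target ((k1, v1) :: rest) (l2, l3)
      = pvLoopA dd target rest
          ((if k2 ∈ l2 then l2 ++ [k1] else (l2 ++ [k1]) ++ [k2]), l3 ++ [[k1, k2]]) := by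
  by_cases hc : k2 ∈ l2
  · simp [pvLoopA, hp, h, hmem, hc]
  · simp [pvLoopA, hp, h, hmem, hc, hk2]

theorem pvLoopB_cons_mem (keys : List Int) (sig : List (List Int))
    (occ : PySem.Dict Int (List Nat)) (k : Int) (i : Nat) (rest : List (Int × Nat))
    (used : PySem.Set Int) (order : List Int) (groups : List (List Int)) (h : k ∈ used) :
    pvLoopB keys sig occ ((k, i) :: rest) (used, order, groups)
      = pvLoopB keys sig occ rest (used, order, groups) := by
  simp [pvLoopB, h]

theorem pvLoopB_cons_none (keys : List Int) (sig : List (List Int))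
    (occ : PySem.Dict Int (List Nat)) (k : Int) (i : Nat) (rest : List (Int × Nat))
    (used : PySem.Set Int) (order : List Int) (groups : List (List Int)) (h : k ∉ used)
    (hb : pvBest occ (sig.getD i []) i = none) :
    pvLoopB keys sig occ ((k, i) :: rest) (used, order, groups)
      = pvLoopB keys sig occ rest (PySem.Set.add used k, order ++ [k], groups ++ [[k]]) := by
  simp only [List.getD_eq_getElem?_getD] at hb
  simp [pvLoopB, hb, h]

theorem pvLoopB_cons_some (keys : List Int) (sig : List (List Int))
    (occ : PySem.Dict Int (List Nat)) (k : Int) (i j : Nat) (rest : List (Int × Nat))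
    (used : PySem.Set Int) (order : List Int) (groups : List (List Int)) (h : k ∉ used)
    (hb : pvBest occ (sig.getD i []) i = some j) :
    pvLoopB keys sig occ ((k, i) :: rest) (used, order, groups)
      = if keys.getD j 0 ∈ PySem.Set.add used k then
          pvLoopB keys sig occ rest
            (PySem.Set.add used k, order ++ [k], groups ++ [[k, keys.getD j 0]])
        else
          pvLoopB keys sig occ rest
            (PySem.Set.add (PySem.Set.add used k) (keys.getD j 0),
              (order ++ [k]) ++ [keys.getD j 0], groups ++ [[k, keys.getD j 0]]) := by
  simp only [List.getD_eq_getElem?_getD] at hb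
  simp [pvLoopB, hb, h]

-- main loop correspondence
theorem pvLoops_eq (dd : List (Int × List Int)) (target : List Int)
    (hnd : (dd.map Prod.fst).Nodup) :
    ∀ (L : List ((Int × List Int) × Nat)) (l2 : List Int) (l3 : List (List Int))
      (used : PySem.Set Int),
      (∀ p ∈ L, p.2 < dd.length ∧ dd.getD p.2 ((0 : Int), ([] : List Int)) = p.1) →
      (∀ x : Int, x ∈ used ↔ x ∈ l2) →
      (∀ t ∈ l3, ∀ x ∈ t, x ∈ l2) →
      pvLoopA dd target (L.map Prod.fst) (l2, l3)
        = pvLoopB (dd.map Prod.fst) (pvSigL dd target) (pvOcc (pvSigL dd target))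
            (L.map (fun p => (p.1.1, p.2))) (used, l2, l3) := by
  intro L
  induction L with
  | nil => intro l2 l3 used _ _ _; rfl
  | cons p L ih =>
    intro l2 l3 used hL hu hl3
    obtain ⟨⟨k1, v1⟩, i⟩ := p
    obtain ⟨hi, hpi⟩ := hL ((k1, v1), i) (by simp)
    have hLtail : ∀ p ∈ L, p.2 < dd.length ∧ dd.getD p.2 ((0 : Int), ([] : List Int)) = p.1 :=
      fun p hp => hL p (by simp [hp])
    simp only [List.map_cons]
    have hkey : (dd.map Prod.fst).getD i 0 = k1 := by
      rw [pvKeys_getD dd i hi, hpi]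
    have hval : (dd.getD i ((0 : Int), ([] : List Int))).2 = v1 := by rw [hpi]
    by_cases hk : k1 ∈ l2
    · rw [pvLoopA_cons_mem dd target k1 v1 _ l2 l3 hk,
          pvLoopB_cons_mem _ _ _ k1 i _ used l2 l3 ((hu k1).mpr hk)]
      exact ih l2 l3 used hLtail hu hl3
    · have hku : k1 ∉ used := fun hx => hk ((hu k1).mp hx)
      have hpart :
          pvFindPartner k1 v1 target dd
            = ((List.range dd.length).find? (pvQ dd target i)).map
                (fun j => (dd.map Prod.fst).getD j 0) := by
        rw [← hkey, ← hval]
        exact pvPartner_eq dd target hnd i hi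
      cases hf : (List.range dd.length).find? (pvQ dd target i) with
      | none =>
        have hany : l3.any (fun t => decide (k1 ∈ t)) = false := by
          rw [List.any_eq_false]
          intro t ht
          simp only [decide_eq_true_eq]
          exact fun hx => hk (hl3 t ht k1 hx)
        rw [pvLoopA_cons_none dd target k1 v1 _ l2 l3 hk (by rw [hpart, hf]; rfl) hany,
            pvLoopB_cons_none _ _ _ k1 i _ used l2 l3 hku (by rw [pvBest_eq dd target i, hf])]
        apply ih
        · exact hLtail
        · intro x
          rw [PySem.Set.mem_add, List.mem_append, hu x, List.mem_singleton]
        · intro t ht x hx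
          rcases List.mem_append.mp ht with ht' | ht'
          · exact List.mem_append_left _ (hl3 t ht' x hx)
          · rw [List.mem_singleton] at ht'
            subst ht'
            rw [List.mem_singleton] at hx
            subst hx
            simp
      | some j =>
        have hq : pvQ dd target i j = true := List.find?_some hf
        have hjn : j < dd.length := List.mem_range.mp (List.mem_of_find?_eq_some hf)
        have hji : j ≠ i := pvQ_ne dd target i j hq
        have hk2 : (dd.map Prod.fst).getD j 0 ≠ k1 := by
          rw [← hkey]
          intro heq
          exact hji (pvKeys_inj dd hnd hjn hi heq)
        have hmem : [k1, (dd.map Prod.fst).getD j 0] ∉ l3 := fun hmm =>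
          hk (hl3 _ hmm k1 (by simp))
        rw [pvLoopA_cons_some dd target k1 ((dd.map Prod.fst).getD j 0) v1 _ l2 l3 hk
              (by rw [hpart, hf]; rfl) hk2 hmem,
            pvLoopB_cons_some _ _ _ k1 i j _ used l2 l3 hku (by rw [pvBest_eq dd target i, hf])]
        by_cases hc : (dd.map Prod.fst).getD j 0 ∈ l2
        · rw [if_pos hc, if_pos (by rw [PySem.Set.mem_add]; exact Or.inl ((hu _).mpr hc))]
          apply ih
          · exact hLtail
          · intro x
            rw [PySem.Set.mem_add, List.mem_append, hu x, List.mem_singleton]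
          · intro t ht x hx
            rcases List.mem_append.mp ht with ht' | ht'
            · exact List.mem_append_left _ (hl3 t ht' x hx)
            · rw [List.mem_singleton] at ht'
              subst ht'
              rcases List.mem_cons.mp hx with rfl | hx
              · simp
              · rw [List.mem_singleton] at hx
                subst hx
                exact List.mem_append_left _ hc
        · rw [if_neg hc,
              if_neg (by
                rw [PySem.Set.mem_add]
                rintro (hx | hx)
                · exact hc ((hu _).mp hx)
                · exact hk2 hx)]
          apply ih
          · exact hLtail
          · intro x
            rw [PySem.Set.mem_add, PySem.Set.mem_add, hu x]
            simp [or_assoc]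
          · intro t ht x hx
            rcases List.mem_append.mp ht with ht' | ht'
            · exact List.mem_append_left _ (List.mem_append_left _ (hl3 t ht' x hx))
            · rw [List.mem_singleton] at ht'
              subst ht'
              rcases List.mem_cons.mp hx with rfl | hx
              · simp
              · rw [List.mem_singleton] at hx
                subst hx
                simp

-- ===== VERDICT (by name: the statement is the Claim_ definition above) =====
theorem process_dict_and_list_spec : Claim_equal_process_dict_and_list := by
  intro dd target _ hpre
  unfold Pre_process_dict_and_list at hpre
  unfold Spec_process_dict_and_list
  show process_dict_and_list dd target = process_dict_and_list_alt dd target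
  unfold process_dict_and_list process_dict_and_list_alt
  have h := pvLoops_eq dd target hpre dd.zipIdx [] [] []
    (by
      intro p hp
      obtain ⟨x, i⟩ := p
      obtain ⟨-, h2, h3⟩ := List.mem_zipIdx hp
      refine ⟨by simpa using h2, ?_⟩
      rw [List.getD_eq_getElem _ _ (by simpa using h2)]
      simp only [Nat.sub_zero] at h3
      exact h3.symm)
    (by simp) (by simp)
  rw [pvZipIdx_map_fst] at h
  have hz : (dd.map Prod.fst).zipIdx = dd.zipIdx.map (fun p => (p.1.1, p.2)) := by
    rw [List.zipIdx_map]
    apply List.map_congr_left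
    intro p _
    rfl
  rw [← hz] at h
  exact h
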